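-- pv_equiv track=rewrite | github.com/BlueC8lyst/ai_research_paper_analysis | modules/module_6.py | generate_overall_suggestions
-- ===== SOURCE A (Python) =====
-- from typing import Dict, Any, List, Optional, Tuple
--
-- def generate_overall_suggestions(critique_results: Dict[str, Any]) -> List[str]:
--     """
--     Create a concise list of next-step suggestions based on failed checks.
--     """
--     suggestions: List[str] = []
--     failed = [name for name, c in critique_results.get("checks", {}).items() if not c.get("passed")]
--     if not failed:
--         suggestions.append("Draft is well-structured. Minor polishing only needed.")
--         suggestions.append("Check references formatting before submission.")
--         return suggestions
--
--     if "clarity" in failed: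
--         suggestions.append("Revise long sentences; convert passive voice to active where appropriate.")
--     if "flow" in failed:
--         suggestions.append("Add transition sentences between sections; make conclusion reference introduction.")
--     if "missing_references" in failed:
--         suggestions.append("Add 2-3 more relevant citations and ensure APA format.")
--     if "repetition" in failed:
--         suggestions.append("Replace frequently repeated words with synonyms.")
--     if "style" in failed:
--         suggestions.append("Eliminate informal language; reduce first-person pronouns.")
--     if "structure" in failed:
--         suggestions.append("Ensure all sections are present and appropriately balanced by length.")
--
--     # General final tips
--     suggestions.append("Read the draft aloud to catch awkward phrasing.")
--     suggestions.append("Have a peer review for factual accuracy.")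
--     return suggestions[:7]
-- ===== SOURCE B (Python) =====
-- from typing import Dict, Any, List
--
-- # rank (= priority order of the suggestions) and message per known check name
-- _CHECK_INFO = {
--     "clarity": (0, "Revise long sentences; convert passive voice to active where appropriate."),
--     "flow": (1, "Add transition sentences between sections; make conclusion reference introduction."),
--     "missing_references": (2, "Add 2-3 more relevant citations and ensure APA format."),
--     "repetition": (3, "Replace frequently repeated words with synonyms."),
--     "style": (4, "Eliminate informal language; reduce first-person pronouns."),
--     "structure": (5, "Ensure all sections are present and appropriately balanced by length."),
-- }
--
-- def generate_overall_suggestions(critique_results: Dict[str, Any]) -> List[str]: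
--     checks = critique_results.get("checks", {})
--     failed = [n for n, c in checks.items() if not c.get("passed")]
--     if not failed:
--         return ["Draft is well-structured. Minor polishing only needed.",
--                 "Check references formatting before submission."]
--     # traverse the FAILED names, rank each known one, and sort by rank
--     ranked = sorted((_CHECK_INFO[n] for n in failed if n in _CHECK_INFO),
--                     key=lambda t: t[0])
--     return ([m for _, m in ranked]
--             + ["Read the draft aloud to catch awkward phrasing.",
--                "Have a peer review for factual accuracy."])[:7]
-- ===== Notes on version B (the rewrite author's own statement) =====
-- stated objective: alternative
-- what changed: Instead of scanning a fixed chain of six membership tests against the failed list, B traverses the failed names themselves, maps each known one through a name->(rank,message) dict, and sorts the hits by rank to recover the canonical order; the empty case and the two trailing tips are unchanged.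
import Mathlib
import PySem

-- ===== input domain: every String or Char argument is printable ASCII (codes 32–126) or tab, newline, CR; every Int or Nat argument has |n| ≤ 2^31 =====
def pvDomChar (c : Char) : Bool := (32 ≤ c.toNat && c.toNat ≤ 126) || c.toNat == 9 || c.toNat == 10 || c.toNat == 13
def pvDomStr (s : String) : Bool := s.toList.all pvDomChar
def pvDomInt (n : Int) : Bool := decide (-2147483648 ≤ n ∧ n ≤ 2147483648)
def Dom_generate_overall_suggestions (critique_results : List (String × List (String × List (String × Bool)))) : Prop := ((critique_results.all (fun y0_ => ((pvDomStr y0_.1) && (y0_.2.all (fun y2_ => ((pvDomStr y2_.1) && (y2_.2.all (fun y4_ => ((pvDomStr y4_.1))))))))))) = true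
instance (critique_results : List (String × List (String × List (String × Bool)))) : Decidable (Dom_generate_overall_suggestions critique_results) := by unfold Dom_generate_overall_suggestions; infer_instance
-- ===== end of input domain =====

-- B ranks each failed check via a name→(rank,message) map and sorts by rank, instead of
-- A's fixed chain of membership tests; same behaviour (alternative decomposition).

-- ===== PORT A =====
def generate_overall_suggestions (critique_results : List (String × List (String × List (String × Bool)))) : List String :=
  let suggestions : List String := []
  let checks := (PySem.Dict.ofList critique_results).getD "checks" []
  let failed : List String :=
    ((PySem.Dict.ofList checks).items.filter
       (fun nc => !(((PySem.Dict.ofList nc.2).get? "passed").getD false))).map (·.1)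
  if failed.isEmpty then
    let suggestions := suggestions ++ ["Draft is well-structured. Minor polishing only needed."]
    let suggestions := suggestions ++ ["Check references formatting before submission."]
    suggestions
  else
    let suggestions := if failed.contains "clarity" then suggestions ++ ["Revise long sentences; convert passive voice to active where appropriate."] else suggestions
    let suggestions := if failed.contains "flow" then suggestions ++ ["Add transition sentences between sections; make conclusion reference introduction."] else suggestions
    let suggestions := if failed.contains "missing_references" then suggestions ++ ["Add 2-3 more relevant citations and ensure APA format."] else suggestions
    let suggestions := if failed.contains "repetition" then suggestions ++ ["Replace frequently repeated words with synonyms."] else suggestions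
    let suggestions := if failed.contains "style" then suggestions ++ ["Eliminate informal language; reduce first-person pronouns."] else suggestions
    let suggestions := if failed.contains "structure" then suggestions ++ ["Ensure all sections are present and appropriately balanced by length."] else suggestions
    let suggestions := suggestions ++ ["Read the draft aloud to catch awkward phrasing."]
    let suggestions := suggestions ++ ["Have a peer review for factual accuracy."]
    PySem.List.slice suggestions none (some 7)

-- ===== PORT B =====
def pvCheckInfoList : List (String × (Int × String)) :=
  [("clarity", (0, "Revise long sentences; convert passive voice to active where appropriate.")),
   ("flow", (1, "Add transition sentences between sections; make conclusion reference introduction.")),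
   ("missing_references", (2, "Add 2-3 more relevant citations and ensure APA format.")),
   ("repetition", (3, "Replace frequently repeated words with synonyms.")),
   ("style", (4, "Eliminate informal language; reduce first-person pronouns.")),
   ("structure", (5, "Ensure all sections are present and appropriately balanced by length."))]

def pvCheckInfo : PySem.Dict String (Int × String) := PySem.Dict.ofList pvCheckInfoList

def generate_overall_suggestions_alt (critique_results : List (String × List (String × List (String × Bool)))) : List String :=
  let checks := (PySem.Dict.ofList critique_results).getD "checks" []
  let failed : List String :=
    ((PySem.Dict.ofList checks).items.filter
       (fun nc => !(((PySem.Dict.ofList nc.2).get? "passed").getD false))).map (·.1)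
  if failed.isEmpty then
    ["Draft is well-structured. Minor polishing only needed.",
     "Check references formatting before submission."]
  else
    let ranked := PySem.List.sorted (failed.filterMap (fun n => pvCheckInfo.get? n)) (fun t => t.1) false
    PySem.List.slice
      (ranked.map (·.2) ++
        ["Read the draft aloud to catch awkward phrasing.",
         "Have a peer review for factual accuracy."])
      none (some 7)

-- ===== PRECONDITION & SPEC =====
def Spec_generate_overall_suggestions (critique_results : List (String × List (String × List (String × Bool)))) (out : List String) : Prop := out = generate_overall_suggestions_alt critique_results
instance (critique_results : List (String × List (String × List (String × Bool)))) (out : List String) : Decidable (Spec_generate_overall_suggestions critique_results out) := by unfold Spec_generate_overall_suggestions; infer_instance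

-- ===== CLAIM =====
def Claim_equal_generate_overall_suggestions : Prop := ∀ (critique_results : List (String × List (String × List (String × Bool)))), Dom_generate_overall_suggestions critique_results → Spec_generate_overall_suggestions critique_results (generate_overall_suggestions critique_results)

-- ===== LEMMAS AND PROOFS =====

-- the failed-names list comes from the items of a Dict, so it has no duplicates
theorem pv_failed_nodup (checks : List (String × List (String × Bool)))
    (p : String × List (String × Bool) → Bool) :
    (((PySem.Dict.ofList checks).items.filter p).map (·.1)).Nodup := by
  have hk : ((PySem.Dict.ofList checks).items.map (fun x => x.1)).Nodup := by
    simpa [PySem.Dict.keys] using PySem.Dict.nodup_keys_ofList checks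
  exact List.Sublist.nodup (List.Sublist.map (fun x : String × List (String × Bool) => x.1) List.filter_sublist) hk

-- lookup in pvCheckInfo characterised by membership in the literal table
theorem pv_get?_iff (n : String) (x : Int × String) :
    pvCheckInfo.get? n = some x ↔ (n, x) ∈ pvCheckInfoList := by
  have hnd : pvCheckInfo.keys.Nodup := PySem.Dict.nodup_keys_ofList pvCheckInfoList
  constructor
  · intro h
    have := PySem.Dict.mem_items_of_get?_eq_some pvCheckInfo h
    simpa [pvCheckInfo] using this
  · intro h
    exact PySem.Dict.get?_of_mem_items pvCheckInfo (by simpa [pvCheckInfo] using h) hnd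

-- B's sorted ranking equals the table scanned in order against the failed set
theorem pv_sorted_eq_filter (fs : List String) (hnd : fs.Nodup) :
    PySem.List.sorted (fs.filterMap (fun n => pvCheckInfo.get? n)) (fun t => t.1) false
      = (pvCheckInfoList.filter (fun p => fs.contains p.1)).map (·.2) := by
  apply PySem.List.sorted_eq_of_perm_of_pairwise_lt
  · -- permutation: both lists are Nodup with the same members
    rw [List.perm_ext_iff_of_nodup]
    · intro x
      simp only [List.mem_filterMap, List.mem_map, List.mem_filter, pv_get?_iff]
      constructor
      · rintro ⟨p, ⟨hp, hc⟩, rfl⟩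
        exact ⟨p.1, by simpa using hc, by simpa using hp⟩
      · rintro ⟨n, hn, hm⟩
        exact ⟨(n, x), ⟨hm, by simpa using hn⟩, rfl⟩
    · -- map snd of a sublist of the table; the table's values are distinct
      exact List.Sublist.nodup (List.Sublist.map (fun p : String × (Int × String) => p.2) List.filter_sublist)
        (by decide : (pvCheckInfoList.map (fun p => p.2)).Nodup)
    · -- filterMap over Nodup fs with an injective-on-values lookup
      apply hnd.filterMap
      intro a b x ha hb
      rw [Option.mem_def, pv_get?_iff] at ha hb
      simp only [pvCheckInfoList, List.mem_cons, List.not_mem_nil, or_false,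
        Prod.mk.injEq] at ha hb
      rcases ha with ⟨rfl, rfl⟩ | ⟨rfl, rfl⟩ | ⟨rfl, rfl⟩ | ⟨rfl, rfl⟩ | ⟨rfl, rfl⟩ | ⟨rfl, rfl⟩ <;>
        simp_all
  · -- ranks strictly increase along the table, hence along any filtered sublist
    exact List.Pairwise.sublist (List.Sublist.map (fun p : String × (Int × String) => p.2) List.filter_sublist)
      (by decide : (pvCheckInfoList.map (fun p => p.2)).Pairwise (fun a b => a.1 < b.1))

-- ===== VERDICT =====
theorem generate_overall_suggestions_spec : Claim_equal_generate_overall_suggestions := by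
  intro cr _
  unfold Spec_generate_overall_suggestions generate_overall_suggestions generate_overall_suggestions_alt
  have hnd := pv_failed_nodup ((PySem.Dict.ofList cr).getD "checks" [])
    (fun nc => !(((PySem.Dict.ofList nc.2).get? "passed").getD false))
  simp only [pv_sorted_eq_filter _ hnd]
  generalize ((PySem.Dict.ofList ((PySem.Dict.ofList cr).getD "checks" [])).items.filter
       (fun nc => !(((PySem.Dict.ofList nc.2).get? "passed").getD false))).map (fun x => x.1) = fs
  by_cases h : fs.isEmpty = true
  · simp [h]
  · simp only [h, Bool.false_eq_true, if_false]
    cases h1 : fs.contains "clarity" <;>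
    cases h2 : fs.contains "flow" <;>
    cases h3 : fs.contains "missing_references" <;>
    cases h4 : fs.contains "repetition" <;>
    cases h5 : fs.contains "style" <;>
    cases h6 : fs.contains "structure" <;>
      simp at h1 h2 h3 h4 h5 h6 <;>
      simp [pvCheckInfoList, h1, h2, h3, h4, h5, h6, PySem.List.slice]
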